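-- pv_equiv track=rewrite | github.com/dplocki/advent-of-code | 2018_02.py | count_twice_and_threes_for_list
-- ===== SOURCE A (Python) =====
-- from collections import Counter
--
-- def find_twice_and_threes(input):
--     values = Counter(input).values()
--
--     return (2 in values, 3 in values)
--
-- def count_twice_and_threes_for_list(list):
--     twice_counter = 0
--     threes_counter = 0
--
--     for input in list:
--         result = find_twice_and_threes(input)
--         twice_counter += 1 if result[0] else 0
--         threes_counter += 1 if result[1] else 0
--
--     return twice_counter, threes_counter
-- ===== SOURCE B (Python) =====
-- def run_lengths(chars):
--     # chars is sorted, so equal characters are adjacent: peel off the leading run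
--     if not chars:
--         return []
--     c = chars[0]
--     run = 1
--     while run < len(chars) and chars[run] == c:
--         run += 1
--     return [run] + run_lengths(chars[run:])
--
--
-- def count_twice_and_threes_for_list(list):
--     twice_counter = 0
--     threes_counter = 0
--     for s in list:
--         lens = run_lengths(sorted(s))
--         twice_counter += 1 if 2 in lens else 0
--         threes_counter += 1 if 3 in lens else 0
--     return twice_counter, threes_counter
-- ===== Notes on version B (the rewrite author's own statement) =====
-- stated objective: alternative
-- what changed: Replaces the per-string hash-table Counter with a sort-then-group algorithm: each string is sorted so equal characters become adjacent, its run lengths are extracted by a recursive leading-run peel, and the twice/thrice tests become membership tests on the run-length list.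
import Mathlib
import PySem

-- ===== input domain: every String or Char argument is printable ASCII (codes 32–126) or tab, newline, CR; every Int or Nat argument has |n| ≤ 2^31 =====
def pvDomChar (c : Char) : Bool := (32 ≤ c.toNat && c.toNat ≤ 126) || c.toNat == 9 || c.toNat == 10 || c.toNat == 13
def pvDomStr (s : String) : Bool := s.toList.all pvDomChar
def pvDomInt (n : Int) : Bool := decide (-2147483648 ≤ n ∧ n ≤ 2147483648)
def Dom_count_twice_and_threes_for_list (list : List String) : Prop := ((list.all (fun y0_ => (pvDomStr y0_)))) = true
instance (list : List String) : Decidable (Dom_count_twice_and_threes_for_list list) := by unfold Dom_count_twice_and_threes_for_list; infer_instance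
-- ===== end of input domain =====

-- B replaces A's per-string Counter hash table with sort-then-group: sort each string,
-- peel off run lengths recursively, and test 2/3 by membership in the run-length list
-- (objective: alternative algorithm, similar cost).

-- ===== PORT A =====
def find_twice_and_threes (input : String) : Bool × Bool :=
  let values := (PySem.Dict.counter input.toList).values
  (values.contains (2 : Int), values.contains (3 : Int))

def count_twice_and_threes_for_list (list : List String) : Int × Int :=
  list.foldl (fun acc input =>
    let result := find_twice_and_threes input
    (acc.1 + (if result.1 then 1 else 0), acc.2 + (if result.2 then 1 else 0))) (0, 0)

-- ===== PORT B =====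
-- run_lengths: the while loop scanning the leading run of chars[0] is exactly
-- takeWhile/dropWhile on the tail; then recurse on the rest (chars[run:])
def run_lengths (chars : List Char) : List Nat :=
  match chars with
  | [] => []
  | c :: rest =>
      (1 + (rest.takeWhile (fun x => x == c)).length)
        :: run_lengths (rest.dropWhile (fun x => x == c))
termination_by chars.length
decreasing_by
  simpa using Nat.lt_succ_of_le (List.length_dropWhile_le (fun x => x == c) rest)

def count_twice_and_threes_for_list_alt (list : List String) : Int × Int :=
  list.foldl (fun acc s =>
    let lens := run_lengths (PySem.List.sorted s.toList (fun x => x) false)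
    (acc.1 + (if lens.contains 2 then 1 else 0),
     acc.2 + (if lens.contains 3 then 1 else 0))) (0, 0)

-- ===== PRECONDITION & SPEC =====
def Spec_count_twice_and_threes_for_list (list : List String) (out : Int × Int) : Prop := out = count_twice_and_threes_for_list_alt list
instance (list : List String) (out : Int × Int) : Decidable (Spec_count_twice_and_threes_for_list list out) := by unfold Spec_count_twice_and_threes_for_list; infer_instance

-- ===== CLAIM (what is proved, stated in full; the proofs are below) =====
def Claim_equal_count_twice_and_threes_for_list : Prop := ∀ (list : List String), Dom_count_twice_and_threes_for_list list → Spec_count_twice_and_threes_for_list list (count_twice_and_threes_for_list list)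

-- ===== LEMMAS AND PROOFS =====

-- A side: the Counter's values list contains n iff some character of cs occurs n times
lemma values_contains (cs : List Char) (n : Nat) :
    ((PySem.Dict.counter cs).values).contains (n : Int) = true ↔ ∃ c ∈ cs, cs.count c = n := by
  rw [PySem.Dict.values_eq_map_keys _ (PySem.Dict.nodup_keys_counter cs) 0,
    PySem.Dict.keys_counter]
  constructor
  · intro h
    simp only [List.contains_eq_mem, List.mem_map, decide_eq_true_eq] at h
    obtain ⟨c, hc, hv⟩ := h
    rw [PySem.Dict.getD_counter] at hv
    exact ⟨c, (PySem.Set.mem_ofList cs c).mp hc, ((by exact_mod_cast hv.symm : n = cs.count c)).symm⟩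
  · rintro ⟨c, hc, hn⟩
    simp only [List.contains_eq_mem, List.mem_map, decide_eq_true_eq]
    exact ⟨c, (PySem.Set.mem_ofList cs c).mpr hc, by rw [PySem.Dict.getD_counter, hn]⟩

-- B side: on a sorted list, run_lengths contains n iff some character occurs n times
lemma run_lengths_contains (cs : List Char) (h : cs.Pairwise (· ≤ ·)) (n : Nat) :
    (run_lengths cs).contains n = true ↔ ∃ c ∈ cs, cs.count c = n := by
  induction cs using run_lengths.induct with
  | case1 => simp [run_lengths]
  | case2 c rest ih =>
      have hrest : rest.Pairwise (· ≤ ·) := h.tail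
      have hdrop : (rest.dropWhile (fun x => x == c)).Pairwise (· ≤ ·) :=
        hrest.sublist (List.dropWhile_sublist _)
      -- every element of the dropped suffix differs from c
      have hne : ∀ x ∈ rest.dropWhile (fun x => x == c), x ≠ c := by
        cases hd : rest.dropWhile (fun x => x == c) with
        | nil => intro x hx; cases hx
        | cons d t =>
            have hdne : (d == c) = false := by
              have hh := List.head_dropWhile_not (fun x => x == c) (l := rest) (by simp [hd])
              simpa [hd] using hh
            have hdc : d ≠ c := by simpa using hdne
            have hdmem : d ∈ rest := by
              refine (List.dropWhile_sublist (fun x => x == c)).subset ?_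
              rw [hd]; exact List.mem_cons_self
            have hcle : c ≤ d := (List.pairwise_cons.mp h).1 d hdmem
            have hclt : c < d := lt_of_le_of_ne hcle (Ne.symm hdc)
            intro x hx
            rcases List.mem_cons.mp hx with rfl | hx
            · exact hdc
            · have hdt : d ≤ x := (List.pairwise_cons.mp (hd ▸ hdrop)).1 x hx
              exact fun hxc => (not_le_of_gt hclt) (hxc ▸ hdt)
      have hsplit : rest = rest.takeWhile (fun x => x == c) ++ rest.dropWhile (fun x => x == c) :=
        (List.takeWhile_append_dropWhile).symm
      have htake : ∀ x ∈ rest.takeWhile (fun x => x == c), x = c := by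
        intro x hx
        simpa using List.mem_takeWhile_imp hx
      -- count of c in the whole list is the leading run length
      have hcount_c : (c :: rest).count c = 1 + (rest.takeWhile (fun x => x == c)).length := by
        rw [List.count_cons_self]
        conv_lhs => rw [hsplit]
        rw [List.count_append]
        have h1 : (rest.takeWhile (fun x => x == c)).count c
            = (rest.takeWhile (fun x => x == c)).length :=
          List.count_eq_length.mpr (fun x hx => ((htake x hx) ▸ rfl : c = x))
        have h2 : (rest.dropWhile (fun x => x == c)).count c = 0 :=
          List.count_eq_zero.mpr (fun hc => (hne c hc) rfl)
        omega
      -- count of any x ≠ c in the whole list equals its count in the dropped suffix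
      have hcount_ne : ∀ x, x ≠ c →
          (c :: rest).count x = (rest.dropWhile (fun x => x == c)).count x := by
        intro x hxc
        rw [List.count_cons_of_ne (Ne.symm hxc)]
        conv_lhs => rw [hsplit]
        rw [List.count_append]
        have h1 : (rest.takeWhile (fun x => x == c)).count x = 0 :=
          List.count_eq_zero.mpr (fun hc => hxc (htake x hc))
        omega
      rw [run_lengths]
      simp only [List.contains_cons, Bool.or_eq_true, beq_iff_eq, ih hdrop]
      constructor
      · rintro (hn | ⟨x, hx, hcx⟩)
        · exact ⟨c, List.mem_cons_self, by omega⟩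
        · refine ⟨x, ?_, ?_⟩
          · exact List.mem_cons_of_mem _ ((List.dropWhile_sublist _).subset hx)
          · rw [hcount_ne x (hne x hx)]; exact hcx
      · rintro ⟨x, hx, hcx⟩
        by_cases hxc : x = c
        · subst hxc; left; omega
        · right
          have hxrest : x ∈ rest := by
            rcases hx with _ | hx
            · exact absurd rfl hxc
            · assumption
          have hxdrop : x ∈ rest.dropWhile (fun x => x == c) := by
            rw [hsplit] at hxrest
            rcases List.mem_append.mp hxrest with hx' | hx'
            · exact absurd (htake x hx') hxc
            · exact hx'
          exact ⟨x, hxdrop, by rw [← hcount_ne x hxc]; exact hcx⟩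

-- per string: A's Counter test equals B's sorted run-length test
lemma per_string (s : String) :
    find_twice_and_threes s
      = ((run_lengths (PySem.List.sorted s.toList (fun x => x) false)).contains 2,
         (run_lengths (PySem.List.sorted s.toList (fun x => x) false)).contains 3) := by
  have hperm : (PySem.List.sorted s.toList (fun x => x) false).Perm s.toList :=
    PySem.List.sorted_perm s.toList (fun x => x) false
  have hpw : (PySem.List.sorted s.toList (fun x => x) false).Pairwise (· ≤ ·) :=
    PySem.List.sorted_pairwise s.toList (fun x => x)
  have key : ∀ n : Nat,
      ((PySem.Dict.counter s.toList).values).contains (n : Int)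
        = (run_lengths (PySem.List.sorted s.toList (fun x => x) false)).contains n := by
    intro n
    rw [Bool.eq_iff_iff, run_lengths_contains _ hpw, values_contains]
    constructor
    · rintro ⟨c, hc, hcnt⟩
      exact ⟨c, hperm.mem_iff.mpr hc, by rw [hperm.count_eq]; exact hcnt⟩
    · rintro ⟨c, hc, hcnt⟩
      exact ⟨c, hperm.mem_iff.mp hc, by rw [← hperm.count_eq]; exact hcnt⟩
  have k2 : ((PySem.Dict.counter s.toList).values).contains (2 : Int)
      = (run_lengths (PySem.List.sorted s.toList (fun x => x) false)).contains 2 := by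
    exact_mod_cast key 2
  have k3 : ((PySem.Dict.counter s.toList).values).contains (3 : Int)
      = (run_lengths (PySem.List.sorted s.toList (fun x => x) false)).contains 3 := by
    exact_mod_cast key 3
  simp only [find_twice_and_threes, k2, k3]

-- ===== VERDICT (by name: the statement is the Claim_ definition above) =====
theorem count_twice_and_threes_for_list_spec : Claim_equal_count_twice_and_threes_for_list := by
  intro l _
  unfold Spec_count_twice_and_threes_for_list
  unfold count_twice_and_threes_for_list count_twice_and_threes_for_list_alt
  congr 1
  funext acc s
  simp only [per_string]
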